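-- pv_equiv track=rewrite | github.com/boostcamp-5th-NLP05/programmers-study | jieun/2_인사고과.py | solution
-- ===== SOURCE A (Python) =====
-- import heapq
--
-- def solution(scores):
--     answer = 0
--     wanho = tuple(scores[0])
--     wanho_sum = sum(wanho)
--
--     scores.sort(reverse=True)  # 내림차순 정렬
--     valid = []  # 인센티브 받는 사원들 저장 (-합)
--
--     check = tuple(scores[0])  # 현재 보고 있는 사원보다 근무 태도 점수가 높은 사원 중 동료 평가 점수가 최대인 점수
--     next_check = tuple(scores[0])  # 현재 보고 있는 사원과 근무 태도 점수가 크거나 같은 사원 중 동료 평가 점수가 최대인 점수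
--
--     ## 인센티브 받는 사원 찾기
--     for i in range(len(scores)):
--
--         # 근무 태도 점수가 바뀌면 next_check와 check 중 동료 평가 점수가 높은 것을 check 조건으로 갱신
--         if scores[i][0] != scores[i - 1][0]:
--             if check[1] < next_check[1]:
--                 check = next_check
--
--         # check 조건보다 점수가 다 낮아서 인센티브 못 받음
--         if scores[i][0] < check[0] and scores[i][1] < check[1]:
--             if tuple(scores[i]) == wanho:
--                 answer = -1
--                 break
--             else:
--                 continue
--
--         # 인센티브 받음
--         heapq.heappush(valid, -sum(scores[i]))
--
--         # 현재 점수와 next_check 점수 중 동료 평가 점수가 높은 것으로 next_check 갱신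
--         if next_check[1] < scores[i][1]:
--             next_check = tuple(scores[i])
--
--     ## 완호가 인센티브 못 받았으면
--     if answer == -1:
--         return answer
--
--     rank = 1  # 현재 보는 석차
--     cnt = 0  # 현재 보는 석차를 가지는 사원 수
--     rank_sum = -1  # 현재 보는 석차에 해당하는 점수 합
--
--     ## 석차 구하기
--     while valid:
--         cur_sum = heapq.heappop(valid)
--         if cur_sum == rank_sum:  # 동일 석차
--             cnt += 1
--         else:
--             rank += cnt
--             cnt = 1
--             rank_sum = cur_sum
--
--         if -cur_sum == wanho_sum:
--             answer = rank
--             break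
--
--     return answer
-- ===== SOURCE B (Python) =====
-- def solution(scores):
--     a0, p0 = scores[0][0], scores[0][1]
--     wanho_sum = sum(scores[0])
--     if any(r[0] > a0 and r[1] > p0 for r in scores):
--         return -1
--     best = None
--     higher = 0
--     for row in sorted(scores, key=lambda r: (-r[0], r[1])):
--         if (best is None or row[1] >= best) and sum(row) > wanho_sum:
--             higher += 1
--         best = row[1] if best is None else max(best, row[1])
--     return higher + 1
-- ===== Notes on version B (the rewrite author's own statement) =====
-- stated objective: simpler
-- what changed: B replaces A's check/next_check group-boundary bookkeeping, heap of negated sums and tie-counting rank pop-loop by an upfront dominance test for employee 0, one sort by (-attitude, peer) and a single running-maximum pass that directly counts eligible employees with a strictly larger score sum.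
import Mathlib
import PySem

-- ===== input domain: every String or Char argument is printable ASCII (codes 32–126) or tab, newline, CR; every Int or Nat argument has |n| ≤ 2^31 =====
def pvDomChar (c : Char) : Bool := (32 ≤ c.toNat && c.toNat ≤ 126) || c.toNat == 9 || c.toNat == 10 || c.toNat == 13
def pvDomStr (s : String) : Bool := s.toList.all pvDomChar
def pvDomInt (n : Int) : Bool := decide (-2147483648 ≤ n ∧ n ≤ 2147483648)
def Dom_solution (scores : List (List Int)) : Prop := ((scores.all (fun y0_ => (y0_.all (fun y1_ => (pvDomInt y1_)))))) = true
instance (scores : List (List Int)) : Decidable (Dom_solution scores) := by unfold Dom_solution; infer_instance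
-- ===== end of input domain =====

-- B is a simpler re-implementation (no heap, no boundary bookkeeping, no rank pop-loop).
-- Side effect note: Python A sorts `scores` in place (reverse=True) while B leaves it unchanged;
-- the equivalence proved here is about the RETURN value.

-- ===== PORT A =====
-- xs[i][j] style element read (indices are in range on every admitted input)
def pyAt (r : List Int) (j : Int) : Int := PySem.List.pyGetD r j 0

-- the `for i in range(len(scores))` loop of A, with its break modelled by an early return of (-1, valid);
-- `valid` models the heap: heappush = sorted insertion, so that pops come out in min-first order,
-- which for int elements is observationally exactly heapq
def solGo (s : List (List Int)) (wanho : List Int) (is_ : List Int)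
    (check nextCheck : List Int) (valid : List Int) : Int × List Int :=
  match is_ with
  | [] => (0, valid)
  | i :: rest =>
    let cur := PySem.List.pyGetD s i []
    let prev := PySem.List.pyGetD s (i - 1) []
    let check := if pyAt cur 0 ≠ pyAt prev 0 then
        (if pyAt check 1 < pyAt nextCheck 1 then nextCheck else check) else check
    if pyAt cur 0 < pyAt check 0 ∧ pyAt cur 1 < pyAt check 1 then
      if cur = wanho then (-1, valid)
      else solGo s wanho rest check nextCheck valid
    else
      let valid := PySem.List.insertBy (fun a b => decide (a < b)) (-(cur.sum)) valid
      let nextCheck := if pyAt nextCheck 1 < pyAt cur 1 then cur else nextCheck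
      solGo s wanho rest check nextCheck valid

-- the `while valid:` rank loop of A (heappop = take the head of the min-first list)
def rankLoop (valid : List Int) (wanhoSum : Int) (rank cnt rankSum : Int) : Int :=
  match valid with
  | [] => 0
  | cur :: rest =>
    let st := if cur = rankSum then (rank, cnt + 1, rankSum) else (rank + cnt, (1:Int), cur)
    if -cur = wanhoSum then st.1 else rankLoop rest wanhoSum st.1 st.2.1 st.2.2

def solution (scores : List (List Int)) : Int :=
  let wanho := PySem.List.pyGetD scores 0 []
  let wanhoSum := wanho.sum
  let s := PySem.List.sorted scores (fun x => x) true
  let first := PySem.List.pyGetD s 0 []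
  let r := solGo s wanho (PySem.List.pyRange 0 s.length 1) first first []
  if r.1 = -1 then -1 else rankLoop r.2 wanhoSum 1 0 (-1)

-- ===== PORT B =====
def solution_alt (scores : List (List Int)) : Int :=
  let a0 := pyAt (PySem.List.pyGetD scores 0 []) 0
  let p0 := pyAt (PySem.List.pyGetD scores 0 []) 1
  let wanhoSum := (PySem.List.pyGetD scores 0 []).sum
  if scores.any (fun r => decide (a0 < pyAt r 0) && decide (p0 < pyAt r 1)) then -1
  else
    let s2 := PySem.List.sorted scores (fun r => toLex (-(pyAt r 0), pyAt r 1)) false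
    let st := s2.foldl (fun (st : Option Int × Int) row =>
      let hit := (match st.1 with
        | none => true
        | some b => decide (b ≤ pyAt row 1)) && decide (wanhoSum < row.sum)
      let higher := if hit then st.2 + 1 else st.2
      let best := match st.1 with
        | none => some (pyAt row 1)
        | some b => some (max b (pyAt row 1))
      (best, higher)) (none, 0)
    st.2 + 1

-- ===== PRECONDITION & SPEC =====
-- Pre_ excludes exactly the inputs where Python A raises an IndexError: an empty scores list
-- (scores[0]) or a row with fewer than two entries (scores[i][1]).
def Pre_solution (scores : List (List Int)) : Prop :=
  scores ≠ [] ∧ ∀ r ∈ scores, 2 ≤ r.length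
instance (scores : List (List Int)) : Decidable (Pre_solution scores) := by
  unfold Pre_solution; infer_instance

def pvWitness_solution : List (List Int) := [[1, 2], [3, 4]]

def Spec_solution (scores : List (List Int)) (out : Int) : Prop := out = solution_alt scores
instance (scores : List (List Int)) (out : Int) : Decidable (Spec_solution scores out) := by
  unfold Spec_solution; infer_instance

-- ===== CLAIM (what is proved, stated in full; the proofs are below) =====
def Claim_equal_solution : Prop :=
  ∀ (scores : List (List Int)), Dom_solution scores → Pre_solution scores →
    Spec_solution scores (solution scores)

-- ===== LEMMAS AND PROOFS =====

-- `r` is eligible for the incentive: nobody beats it on both entries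
def eligB (sc : List (List Int)) (r : List Int) : Bool :=
  !(sc.any (fun q => decide (pyAt r 0 < pyAt q 0) && decide (pyAt r 1 < pyAt q 1)))

-- A's main loop re-indexed: recursion on the remaining rows, carrying the previous row
def solGoL (wanho prev : List Int) (rows : List (List Int))
    (check nextCheck : List Int) (valid : List Int) : Int × List Int :=
  match rows with
  | [] => (0, valid)
  | cur :: rest =>
    let check := if pyAt cur 0 ≠ pyAt prev 0 then
        (if pyAt check 1 < pyAt nextCheck 1 then nextCheck else check) else check
    if pyAt cur 0 < pyAt check 0 ∧ pyAt cur 1 < pyAt check 1 then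
      if cur = wanho then (-1, valid)
      else solGoL wanho cur rest check nextCheck valid
    else
      let valid := PySem.List.insertBy (fun a b => decide (a < b)) (-(cur.sum)) valid
      let nextCheck := if pyAt nextCheck 1 < pyAt cur 1 then cur else nextCheck
      solGoL wanho cur rest check nextCheck valid

theorem pyAt_zero (x : Int) (xs : List Int) : pyAt (x::xs) 0 = x := by
  simp [pyAt, PySem.List.pyGetD, PySem.List.pyGet?, PySem.List.pyIdx?]

theorem att_le_att (a b : List Int) (ha : a ≠ []) (hb : b ≠ []) (h : a ≤ b) :
    pyAt a 0 ≤ pyAt b 0 := by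
  match a, b with
  | x :: xs, y :: ys =>
    rw [pyAt_zero, pyAt_zero]
    by_contra hxy
    exact absurd (List.Lex.rel (by omega) : (y :: ys : List Int) < x :: xs) (not_lt.mpr h)


theorem eligB_false_iff (sc : List (List Int)) (r : List Int) :
    eligB sc r = false ↔ ∃ q ∈ sc, pyAt r 0 < pyAt q 0 ∧ pyAt r 1 < pyAt q 1 := by
  simp [eligB]

theorem eligB_true_iff (sc : List (List Int)) (r : List Int) :
    eligB sc r = true ↔ ∀ q ∈ sc, pyAt r 0 < pyAt q 0 → pyAt q 1 ≤ pyAt r 1 := by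
  simp [eligB]

theorem insertBy_nil {α : Type} (f : α → α → Bool) (x : α) :
    PySem.List.insertBy f x [] = [x] := rfl

theorem sorted_append_one (l : List Int) (x : Int) :
    PySem.List.sorted (l ++ [x]) (fun v => v) false =
      PySem.List.insertBy (fun a b => decide (a < b)) x (PySem.List.sorted l (fun v => v) false) := by
  rw [PySem.List.sorted_eq_foldl_insertBy, PySem.List.sorted_eq_foldl_insertBy, List.foldl_append]
  rfl

theorem sorted_singleton (x : Int) :
    PySem.List.sorted [x] (fun v => v) false = [x] := rfl

-- A's reverse sort, re-expressed with Mathlib's linear-order instances (same Boolean comparisons)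
theorem sortedA_irrel (xs : List (List Int)) :
    PySem.List.sorted xs (fun x => x) true =
    @PySem.List.sorted (List Int) (List Int) List.instLinearOrder.toLT
      (@LinearOrder.toDecidableLT _ List.instLinearOrder) xs (fun x => x) true := by
  show List.foldl (fun acc x => PySem.List.insertBy
      (fun a b => decide ((fun x => x) b < (fun x => x) a)) x acc) [] xs =
    List.foldl (fun acc x => PySem.List.insertBy
      (fun a b => @decide _ (@LinearOrder.toDecidableLT _ List.instLinearOrder
        ((fun x => x) b) ((fun x => x) a))) x acc) [] xs
  congr 1
  funext acc x
  congr 1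
  funext a b
  exact decide_eq_decide.mpr (List.lt_iff_lex_lt _ _)

-- the invariant-carrying induction for A's main loop
theorem solGoL_inv (sc : List (List Int)) (W : List Int) (S : List (List Int))
    (hmem : ∀ r, r ∈ S ↔ r ∈ sc)
    (hsort : S.Pairwise (fun a b => b ≤ a))
    (hlen : ∀ r ∈ sc, 2 ≤ r.length) :
    ∀ (R P : List (List Int)) (prev check nc : List Int) (valid : List Int),
    S = P ++ R →
    ((P = [] ∧ R.head? = some prev ∧ check = prev ∧ nc = prev ∧ valid = []) ∨
      (prev ∈ P ∧ (∀ q ∈ P, pyAt prev 0 ≤ pyAt q 0) ∧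
       nc ∈ P ∧ (∀ q ∈ P, pyAt q 1 ≤ pyAt nc 1) ∧
       check ∈ P ∧
       ((pyAt check 0 = pyAt prev 0 ∧ ∀ q ∈ P, pyAt q 0 = pyAt prev 0) ∨
        (pyAt prev 0 < pyAt check 0 ∧
          ∀ q ∈ P, pyAt prev 0 < pyAt q 0 → pyAt q 1 ≤ pyAt check 1)) ∧
       valid = PySem.List.sorted ((P.filter (eligB sc)).map (fun r => -r.sum)) (fun x => x) false)) →
    ((∀ r ∈ R, eligB sc r = false → r ≠ W) →
        solGoL W prev R check nc valid =
          (0, PySem.List.sorted (((P ++ R).filter (eligB sc)).map (fun r => -r.sum)) (fun x => x) false)) ∧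
    ((∃ r ∈ R, eligB sc r = false ∧ r = W) → (solGoL W prev R check nc valid).1 = -1) := by
  intro R
  induction R with
  | nil =>
    intro P prev check nc valid hsplit hstate
    constructor
    · intro _
      rcases hstate with ⟨_, hhd, _⟩ | ⟨_, _, _, _, _, _, hval⟩
      · simp at hhd
      · rw [hval]; simp [solGoL]
    · rintro ⟨r, hr, _⟩; simp at hr
  | cons cur R' ih =>
    intro P prev check nc valid hsplit hstate
    have hcurS : cur ∈ S := by rw [hsplit]; simp
    have hScur : ∀ q ∈ S, q ∈ sc := fun q hq => (hmem q).mp hq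
    have hne : ∀ r ∈ S, r ≠ ([] : List Int) := by
      intro r hr h
      have h2 := hlen r ((hmem r).mp hr)
      subst h; simp at h2
    have hsort' := hsort
    rw [hsplit] at hsort'
    obtain ⟨hPp, hCRp, hPR⟩ := List.pairwise_append.mp hsort'
    have hcurR' : ∀ q ∈ R', q ≤ cur := (List.pairwise_cons.mp hCRp).1
    have hPcur : ∀ q ∈ P, cur ≤ q := fun q hq => hPR q hq cur List.mem_cons_self
    have hPmem : ∀ q ∈ P, q ∈ S := by
      intro q hq; rw [hsplit]; exact List.mem_append_left _ hq
    have hR'mem : ∀ q ∈ R', q ∈ S := by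
      intro q hq; rw [hsplit]; simp [hq]
    have hattPcur : ∀ q ∈ P, pyAt cur 0 ≤ pyAt q 0 := fun q hq =>
      att_le_att cur q (hne cur hcurS) (hne q (hPmem q hq)) (hPcur q hq)
    have hattR' : ∀ q ∈ R', pyAt q 0 ≤ pyAt cur 0 := fun q hq =>
      att_le_att q cur (hne q (hR'mem q hq)) (hne cur hcurS) (hcurR' q hq)
    have hsplit' : S = (P ++ [cur]) ++ R' := by rw [hsplit]; simp
    have hlist : (P ++ [cur]) ++ R' = P ++ cur :: R' := by simp
    have helig_of : (∀ q ∈ P, pyAt cur 0 < pyAt q 0 → pyAt q 1 ≤ pyAt cur 1) →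
        eligB sc cur = true := by
      intro hP
      rw [eligB_true_iff]
      intro q hq hlt0
      have hqS : q ∈ S := (hmem q).mpr hq
      rw [hsplit] at hqS
      rcases List.mem_append.mp hqS with hqP | hqCR
      · exact hP q hqP hlt0
      · rcases List.mem_cons.mp hqCR with rfl | hqR'
        · omega
        · exact absurd hlt0 (not_lt.mpr (hattR' q hqR'))
    have helig_not : ∀ q ∈ P, pyAt cur 0 < pyAt q 0 → pyAt cur 1 < pyAt q 1 →
        eligB sc cur = false := by
      intro q hq h0 h1
      rw [eligB_false_iff]
      exact ⟨q, hScur q (hPmem q hq), h0, h1⟩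
    rcases hstate with ⟨hP0, hhd, hckeq, hnceq, hvaleq⟩ |
      ⟨hprevP, hprevmin, hncP, hncmax, hckP, hckdisj, hval⟩
    · -- ===== start case: empty prefix =====
      subst hP0
      have hpc : cur = prev := by
        have h := hhd
        simp at h
        exact h
      subst hckeq; subst hnceq; subst hvaleq
      rw [← hpc]
      have helig : eligB sc cur = true := helig_of (by intro q hq; simp at hq)
      have hstep : solGoL W cur (cur :: R') cur cur [] =
          solGoL W cur R' cur cur
            (PySem.List.insertBy (fun a b => decide (a < b)) (-(cur.sum)) []) := by
        simp only [solGoL, ite_self, lt_self_iff_false, false_and, if_false]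
      rw [hstep]
      obtain ⟨ih1, ih2⟩ := ih [cur] cur cur cur
        (PySem.List.insertBy (fun a b => decide (a < b)) (-(cur.sum)) [])
        (by simpa using hsplit)
        (Or.inr ⟨by simp, by simp, by simp, by simp, by simp, Or.inl ⟨rfl, by simp⟩,
          by rw [insertBy_nil]; simp [helig, sorted_singleton]⟩)
      constructor
      · intro hno
        have h := ih1 (fun r hr hre => hno r (by simp [hr]) hre)
        rw [show ([cur] ++ R' : List (List Int)) = [] ++ cur :: R' from by simp] at h
        exact h
      · rintro ⟨r, hr, hre, hrw⟩
        rcases List.mem_cons.mp hr with rfl | hr'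
        · rw [helig] at hre; cases hre
        · exact ih2 ⟨r, hr', hre, hrw⟩
    · -- ===== main case: nonempty prefix =====
      subst hval
      have hattcp : pyAt cur 0 ≤ pyAt prev 0 :=
        att_le_att cur prev (hne cur hcurS) (hne prev (hPmem prev hprevP)) (hPcur prev hprevP)
      have hprevmin' : ∀ q ∈ P ++ [cur], pyAt cur 0 ≤ pyAt q 0 := by
        intro q hq
        rcases List.mem_append.mp hq with h | h
        · exact hattPcur q h
        · have hqc : q = cur := by simpa using h
          rw [hqc]
      by_cases hgrp : pyAt cur 0 = pyAt prev 0
      · -- same attitude group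
        rcases hckdisj with ⟨hck0, hallP⟩ | ⟨hcklt, hckmax⟩
        · -- whole prefix is one group: eligible
          have hcond : ¬(pyAt cur 0 < pyAt check 0 ∧ pyAt cur 1 < pyAt check 1) := by
            intro h
            have h1 := h.1
            rw [hck0, ← hgrp] at h1
            exact lt_irrefl _ h1
          have helig : eligB sc cur = true := helig_of (by
            intro q hq hlt
            rw [hallP q hq, ← hgrp] at hlt
            exact absurd hlt (lt_irrefl _))
          have hstep : solGoL W prev (cur :: R') check nc
              (PySem.List.sorted ((P.filter (eligB sc)).map (fun r => -r.sum)) (fun x => x) false) =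
              solGoL W cur R' check (if pyAt nc 1 < pyAt cur 1 then cur else nc)
                (PySem.List.insertBy (fun a b => decide (a < b)) (-(cur.sum))
                  (PySem.List.sorted ((P.filter (eligB sc)).map (fun r => -r.sum)) (fun x => x) false)) := by
            simp only [solGoL]
            rw [if_neg (not_not_intro hgrp), if_neg hcond]
          rw [hstep]
          obtain ⟨ih1, ih2⟩ := ih (P ++ [cur]) cur check (if pyAt nc 1 < pyAt cur 1 then cur else nc)
            (PySem.List.insertBy (fun a b => decide (a < b)) (-(cur.sum))
              (PySem.List.sorted ((P.filter (eligB sc)).map (fun r => -r.sum)) (fun x => x) false))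
            hsplit'
            (Or.inr ⟨by simp, hprevmin',
              by by_cases hx : pyAt nc 1 < pyAt cur 1 <;> simp [hx, hncP],
              by
                intro q hq
                rcases List.mem_append.mp hq with h | h
                · have := hncmax q h
                  by_cases hx : pyAt nc 1 < pyAt cur 1
                  · rw [if_pos hx]; omega
                  · rw [if_neg hx]; omega
                · have hqc : q = cur := by simpa using h
                  rw [hqc]
                  by_cases hx : pyAt nc 1 < pyAt cur 1
                  · rw [if_pos hx]
                  · rw [if_neg hx]; omega,
              List.mem_append_left _ hckP,
              Or.inl ⟨by rw [hck0, hgrp], by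
                intro q hq
                rcases List.mem_append.mp hq with h | h
                · rw [hallP q h, hgrp]
                · have hqc : q = cur := by simpa using h
                  rw [hqc]⟩,
              by
                have hfe : (P ++ [cur]).filter (eligB sc) = P.filter (eligB sc) ++ [cur] := by
                  rw [List.filter_append]; simp [helig]
                rw [hfe, List.map_append, List.map_cons, List.map_nil, sorted_append_one]⟩)
          constructor
          · intro hno
            have h := ih1 (fun r hr hre => hno r (by simp [hr]) hre)
            rw [hlist] at h
            exact h
          · rintro ⟨r, hr, hre, hrw⟩
            rcases List.mem_cons.mp hr with rfl | hr'
            · rw [helig] at hre; cases hre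
            · exact ih2 ⟨r, hr', hre, hrw⟩
        · -- an earlier group exists: check decides
          have hattCK : pyAt cur 0 < pyAt check 0 := by rw [hgrp]; exact hcklt
          have hckmax' : ∀ q ∈ P, pyAt cur 0 < pyAt q 0 → pyAt q 1 ≤ pyAt check 1 := by
            intro q hq h
            exact hckmax q hq (by rw [← hgrp]; exact h)
          by_cases hpeer : pyAt cur 1 < pyAt check 1
          · -- dominated
            have heligF : eligB sc cur = false := helig_not check hckP hattCK hpeer
            have hcond : pyAt cur 0 < pyAt check 0 ∧ pyAt cur 1 < pyAt check 1 := ⟨hattCK, hpeer⟩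
            by_cases hW : cur = W
            · have hstep : solGoL W prev (cur :: R') check nc
                  (PySem.List.sorted ((P.filter (eligB sc)).map (fun r => -r.sum)) (fun x => x) false) =
                  (-1, PySem.List.sorted ((P.filter (eligB sc)).map (fun r => -r.sum)) (fun x => x) false) := by
                simp only [solGoL]
                rw [if_neg (not_not_intro hgrp), if_pos hcond, if_pos hW]
              constructor
              · intro hno
                exact absurd hW (hno cur List.mem_cons_self heligF)
              · intro _
                rw [hstep]
            · have hstep : solGoL W prev (cur :: R') check nc
                  (PySem.List.sorted ((P.filter (eligB sc)).map (fun r => -r.sum)) (fun x => x) false) =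
                  solGoL W cur R' check nc
                    (PySem.List.sorted ((P.filter (eligB sc)).map (fun r => -r.sum)) (fun x => x) false) := by
                simp only [solGoL]
                rw [if_neg (not_not_intro hgrp), if_pos hcond, if_neg hW]
              rw [hstep]
              obtain ⟨ih1, ih2⟩ := ih (P ++ [cur]) cur check nc
                (PySem.List.sorted ((P.filter (eligB sc)).map (fun r => -r.sum)) (fun x => x) false)
                hsplit'
                (Or.inr ⟨by simp, hprevmin',
                  List.mem_append_left _ hncP,
                  by
                    intro q hq
                    rcases List.mem_append.mp hq with h | h
                    · exact hncmax q h
                    · have hqc : q = cur := by simpa using h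
                      rw [hqc]
                      have h1 := hncmax check hckP
                      omega,
                  List.mem_append_left _ hckP,
                  Or.inr ⟨hattCK, by
                    intro q hq h
                    rcases List.mem_append.mp hq with hh | hh
                    · exact hckmax' q hh h
                    · have hqc : q = cur := by simpa using hh
                      rw [hqc] at h
                      exact absurd h (lt_irrefl _)⟩,
                  by
                    have hfe : (P ++ [cur]).filter (eligB sc) = P.filter (eligB sc) := by
                      rw [List.filter_append]; simp [heligF]
                    rw [hfe]⟩)
              constructor
              · intro hno
                have h := ih1 (fun r hr hre => hno r (by simp [hr]) hre)
                rw [hlist] at h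
                exact h
              · rintro ⟨r, hr, hre, hrw⟩
                rcases List.mem_cons.mp hr with rfl | hr'
                · exact absurd hrw hW
                · exact ih2 ⟨r, hr', hre, hrw⟩
          · -- eligible
            have helig : eligB sc cur = true := helig_of (by
              intro q hq hlt
              exact le_trans (hckmax' q hq hlt) (not_lt.mp hpeer))
            have hcond : ¬(pyAt cur 0 < pyAt check 0 ∧ pyAt cur 1 < pyAt check 1) := by
              intro h; exact hpeer h.2
            have hstep : solGoL W prev (cur :: R') check nc
                (PySem.List.sorted ((P.filter (eligB sc)).map (fun r => -r.sum)) (fun x => x) false) =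
                solGoL W cur R' check (if pyAt nc 1 < pyAt cur 1 then cur else nc)
                  (PySem.List.insertBy (fun a b => decide (a < b)) (-(cur.sum))
                    (PySem.List.sorted ((P.filter (eligB sc)).map (fun r => -r.sum)) (fun x => x) false)) := by
              simp only [solGoL]
              rw [if_neg (not_not_intro hgrp), if_neg hcond]
            rw [hstep]
            obtain ⟨ih1, ih2⟩ := ih (P ++ [cur]) cur check (if pyAt nc 1 < pyAt cur 1 then cur else nc)
              (PySem.List.insertBy (fun a b => decide (a < b)) (-(cur.sum))
                (PySem.List.sorted ((P.filter (eligB sc)).map (fun r => -r.sum)) (fun x => x) false))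
              hsplit'
              (Or.inr ⟨by simp, hprevmin',
                by by_cases hx : pyAt nc 1 < pyAt cur 1 <;> simp [hx, hncP],
                by
                  intro q hq
                  rcases List.mem_append.mp hq with h | h
                  · have := hncmax q h
                    by_cases hx : pyAt nc 1 < pyAt cur 1
                    · rw [if_pos hx]; omega
                    · rw [if_neg hx]; omega
                  · have hqc : q = cur := by simpa using h
                    rw [hqc]
                    by_cases hx : pyAt nc 1 < pyAt cur 1
                    · rw [if_pos hx]
                    · rw [if_neg hx]; omega,
                List.mem_append_left _ hckP,
                Or.inr ⟨hattCK, by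
                  intro q hq h
                  rcases List.mem_append.mp hq with hh | hh
                  · exact hckmax' q hh h
                  · have hqc : q = cur := by simpa using hh
                    rw [hqc] at h
                    exact absurd h (lt_irrefl _)⟩,
                by
                  have hfe : (P ++ [cur]).filter (eligB sc) = P.filter (eligB sc) ++ [cur] := by
                    rw [List.filter_append]; simp [helig]
                  rw [hfe, List.map_append, List.map_cons, List.map_nil, sorted_append_one]⟩)
            constructor
            · intro hno
              have h := ih1 (fun r hr hre => hno r (by simp [hr]) hre)
              rw [hlist] at h
              exact h
            · rintro ⟨r, hr, hre, hrw⟩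
              rcases List.mem_cons.mp hr with rfl | hr'
              · rw [helig] at hre; cases hre
              · exact ih2 ⟨r, hr', hre, hrw⟩
      · -- new attitude group: the boundary update fires
        have hgrplt : pyAt cur 0 < pyAt prev 0 := lt_of_le_of_ne hattcp hgrp
        obtain ⟨hCKP, hCKmax, hCKle⟩ :
            (if pyAt check 1 < pyAt nc 1 then nc else check) ∈ P ∧
            (∀ q ∈ P, pyAt q 1 ≤ pyAt (if pyAt check 1 < pyAt nc 1 then nc else check) 1) ∧
            pyAt (if pyAt check 1 < pyAt nc 1 then nc else check) 1 ≤ pyAt nc 1 := by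
          by_cases hx : pyAt check 1 < pyAt nc 1
          · rw [if_pos hx]; exact ⟨hncP, hncmax, le_refl _⟩
          · rw [if_neg hx]
            exact ⟨hckP, fun q hq => le_trans (hncmax q hq) (not_lt.mp hx), hncmax check hckP⟩
        have hattCK : pyAt cur 0 < pyAt (if pyAt check 1 < pyAt nc 1 then nc else check) 0 :=
          lt_of_lt_of_le hgrplt (hprevmin _ hCKP)
        by_cases hpeer : pyAt cur 1 < pyAt (if pyAt check 1 < pyAt nc 1 then nc else check) 1
        · -- dominated
          have heligF : eligB sc cur = false := helig_not _ hCKP hattCK hpeer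
          have hcond : pyAt cur 0 < pyAt (if pyAt check 1 < pyAt nc 1 then nc else check) 0 ∧
              pyAt cur 1 < pyAt (if pyAt check 1 < pyAt nc 1 then nc else check) 1 := ⟨hattCK, hpeer⟩
          by_cases hW : cur = W
          · have hstep : solGoL W prev (cur :: R') check nc
                (PySem.List.sorted ((P.filter (eligB sc)).map (fun r => -r.sum)) (fun x => x) false) =
                (-1, PySem.List.sorted ((P.filter (eligB sc)).map (fun r => -r.sum)) (fun x => x) false) := by
              simp only [solGoL]
              rw [if_pos hgrp, if_pos hcond, if_pos hW]
            constructor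
            · intro hno
              exact absurd hW (hno cur List.mem_cons_self heligF)
            · intro _
              rw [hstep]
          · have hstep : solGoL W prev (cur :: R') check nc
                (PySem.List.sorted ((P.filter (eligB sc)).map (fun r => -r.sum)) (fun x => x) false) =
                solGoL W cur R' (if pyAt check 1 < pyAt nc 1 then nc else check) nc
                  (PySem.List.sorted ((P.filter (eligB sc)).map (fun r => -r.sum)) (fun x => x) false) := by
              simp only [solGoL]
              rw [if_pos hgrp, if_pos hcond, if_neg hW]
            rw [hstep]
            obtain ⟨ih1, ih2⟩ := ih (P ++ [cur]) cur (if pyAt check 1 < pyAt nc 1 then nc else check) nc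
              (PySem.List.sorted ((P.filter (eligB sc)).map (fun r => -r.sum)) (fun x => x) false)
              hsplit'
              (Or.inr ⟨by simp, hprevmin',
                List.mem_append_left _ hncP,
                by
                  intro q hq
                  rcases List.mem_append.mp hq with h | h
                  · exact hncmax q h
                  · have hqc : q = cur := by simpa using h
                    rw [hqc]
                    omega,
                List.mem_append_left _ hCKP,
                Or.inr ⟨hattCK, by
                  intro q hq h
                  rcases List.mem_append.mp hq with hh | hh
                  · exact hCKmax q hh
                  · have hqc : q = cur := by simpa using hh
                    rw [hqc] at h
                    exact absurd h (lt_irrefl _)⟩,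
                by
                  have hfe : (P ++ [cur]).filter (eligB sc) = P.filter (eligB sc) := by
                    rw [List.filter_append]; simp [heligF]
                  rw [hfe]⟩)
            constructor
            · intro hno
              have h := ih1 (fun r hr hre => hno r (by simp [hr]) hre)
              rw [hlist] at h
              exact h
            · rintro ⟨r, hr, hre, hrw⟩
              rcases List.mem_cons.mp hr with rfl | hr'
              · exact absurd hrw hW
              · exact ih2 ⟨r, hr', hre, hrw⟩
        · -- eligible
          have helig : eligB sc cur = true := helig_of (by
            intro q hq hlt
            exact le_trans (hCKmax q hq) (not_lt.mp hpeer))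
          have hcond : ¬(pyAt cur 0 < pyAt (if pyAt check 1 < pyAt nc 1 then nc else check) 0 ∧
              pyAt cur 1 < pyAt (if pyAt check 1 < pyAt nc 1 then nc else check) 1) := by
            intro h; exact hpeer h.2
          have hstep : solGoL W prev (cur :: R') check nc
              (PySem.List.sorted ((P.filter (eligB sc)).map (fun r => -r.sum)) (fun x => x) false) =
              solGoL W cur R' (if pyAt check 1 < pyAt nc 1 then nc else check)
                (if pyAt nc 1 < pyAt cur 1 then cur else nc)
                (PySem.List.insertBy (fun a b => decide (a < b)) (-(cur.sum))
                  (PySem.List.sorted ((P.filter (eligB sc)).map (fun r => -r.sum)) (fun x => x) false)) := by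
            simp only [solGoL]
            rw [if_pos hgrp, if_neg hcond]
          rw [hstep]
          obtain ⟨ih1, ih2⟩ := ih (P ++ [cur]) cur (if pyAt check 1 < pyAt nc 1 then nc else check)
            (if pyAt nc 1 < pyAt cur 1 then cur else nc)
            (PySem.List.insertBy (fun a b => decide (a < b)) (-(cur.sum))
              (PySem.List.sorted ((P.filter (eligB sc)).map (fun r => -r.sum)) (fun x => x) false))
            hsplit'
            (Or.inr ⟨by simp, hprevmin',
              by by_cases hx : pyAt nc 1 < pyAt cur 1 <;> simp [hx, hncP],
              by
                intro q hq
                rcases List.mem_append.mp hq with h | h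
                · have := hncmax q h
                  by_cases hx : pyAt nc 1 < pyAt cur 1
                  · rw [if_pos hx]; omega
                  · rw [if_neg hx]; omega
                · have hqc : q = cur := by simpa using h
                  rw [hqc]
                  by_cases hx : pyAt nc 1 < pyAt cur 1
                  · rw [if_pos hx]
                  · rw [if_neg hx]; omega,
              List.mem_append_left _ hCKP,
              Or.inr ⟨hattCK, by
                intro q hq h
                rcases List.mem_append.mp hq with hh | hh
                · exact hCKmax q hh
                · have hqc : q = cur := by simpa using hh
                  rw [hqc] at h
                  exact absurd h (lt_irrefl _)⟩,
              by
                have hfe : (P ++ [cur]).filter (eligB sc) = P.filter (eligB sc) ++ [cur] := by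
                  rw [List.filter_append]; simp [helig]
                rw [hfe, List.map_append, List.map_cons, List.map_nil, sorted_append_one]⟩)
          constructor
          · intro hno
            have h := ih1 (fun r hr hre => hno r (by simp [hr]) hre)
            rw [hlist] at h
            exact h
          · rintro ⟨r, hr, hre, hrw⟩
            rcases List.mem_cons.mp hr with rfl | hr'
            · rw [helig] at hre; cases hre
            · exact ih2 ⟨r, hr', hre, hrw⟩

-- the index loop equals the re-indexed loop
theorem solGo_eq_solGoL (s : List (List Int)) (w : List Int) :
    ∀ (R P : List (List Int)) (hP : P ≠ []) (c nc v : List Int), s = P ++ R →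
    solGo s w (PySem.List.pyRange (P.length) (s.length) 1) c nc v =
      solGoL w (P.getLast hP) R c nc v := by
  intro R
  induction R with
  | nil =>
    intro P hP c nc v hsplit
    have hr : PySem.List.pyRange (P.length) (s.length) 1 = [] := by
      apply PySem.List.pyRange_one_eq_nil
      subst hsplit; simp
    rw [hr]
    simp [solGo, solGoL]
  | cons cur R' ih =>
    intro P hP c nc v hsplit
    have hPpos : 0 < P.length := List.length_pos_iff.mpr hP
    have hlens : s.length = P.length + (R'.length + 1) := by subst hsplit; simp
    have hlt : ((P.length : Int)) < ((s.length : Int)) := by omega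
    rw [PySem.List.pyRange_one_cons hlt]
    have hcur : PySem.List.pyGetD s ((P.length : Int)) [] = cur := by
      subst hsplit
      rw [PySem.List.pyGetD_natCast, List.getD_eq_getElem?_getD,
          List.getElem?_append_right (le_refl _)]
      simp
    have hprev : PySem.List.pyGetD s ((P.length : Int) - 1) [] = P.getLast hP := by
      have h1 : ((P.length : Int) - 1) = ((P.length - 1 : Nat) : Int) := by omega
      rw [h1, PySem.List.pyGetD_natCast, List.getD_eq_getElem?_getD]
      subst hsplit
      rw [List.getElem?_append_left (by omega)]
      rw [List.getLast_eq_getElem]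
      rw [List.getElem?_eq_getElem (by omega)]
      rfl
    have hglast : ∀ (h : P ++ [cur] ≠ []), (P ++ [cur]).getLast h = cur := by
      intro h; simp
    have hsplit' : s = (P ++ [cur]) ++ R' := by rw [hsplit]; simp
    have hlen' : ((P.length : Int) + 1) = (((P ++ [cur]).length : Nat) : Int) := by
      simp
    simp only [solGo, solGoL, hcur, hprev]
    by_cases hcond : pyAt cur 0 <
        pyAt (if pyAt cur 0 ≠ pyAt (P.getLast hP) 0 then
          (if pyAt c 1 < pyAt nc 1 then nc else c) else c) 0 ∧
        pyAt cur 1 <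
        pyAt (if pyAt cur 0 ≠ pyAt (P.getLast hP) 0 then
          (if pyAt c 1 < pyAt nc 1 then nc else c) else c) 1
    · rw [if_pos hcond, if_pos hcond]
      by_cases hw : cur = w
      · rw [if_pos hw, if_pos hw]
      · rw [if_neg hw, if_neg hw]
        rw [hlen']
        rw [ih (P ++ [cur]) (by simp) _ _ _ hsplit', hglast]
    · rw [if_neg hcond, if_neg hcond]
      rw [hlen']
      rw [ih (P ++ [cur]) (by simp) _ _ _ hsplit', hglast]

theorem solGo_start (s : List (List Int)) (w f : List Int) (hs : s ≠ [])
    (hf : s.head? = some f) :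
    solGo s w (PySem.List.pyRange 0 (s.length) 1) f f [] = solGoL w f s f f [] := by
  match s, hf with
  | f0 :: T, hf =>
    have hf0 : f0 = f := by simpa using hf
    subst hf0
    have h0 : ((0 : Int)) < (((f0 :: T).length : Nat) : Int) := by simp
    rw [PySem.List.pyRange_one_cons h0]
    have hcur : PySem.List.pyGetD (f0 :: T) (0 : Int) [] = f0 := by
      rw [(by norm_num : (0:Int) = ((0:Nat):Int)), PySem.List.pyGetD_natCast]
      rfl
    simp only [solGo, solGoL, hcur, ite_self, lt_self_iff_false, false_and, if_false]
    have h1 : ((0 : Int) + 1) = ((([f0].length : Nat)) : Int) := by simp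
    rw [h1]
    rw [solGo_eq_solGoL (f0 :: T) w T [f0] (by simp) _ _ _ (by simp)]
    rfl

-- the rank pop-loop counts the strictly smaller elements
theorem rankLoop_eq (w : Int) :
    ∀ (V : List Int) (rank cnt rankSum : Int),
    V.Pairwise (· ≤ ·) → (-w) ∈ V → (rankSum = -w → cnt = 0) →
    rankLoop V w rank cnt rankSum = rank + cnt + (V.countP (fun v => decide (v < -w)) : Int) := by
  intro V
  induction V with
  | nil => intro rank cnt rankSum _ hw _; simp at hw
  | cons cur rest ih =>
    intro rank cnt rankSum hp hw hrs
    obtain ⟨hcle, hp'⟩ := List.pairwise_cons.mp hp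
    have hzero : (-cur = w) → (cur :: rest).countP (fun v => decide (v < -w)) = 0 := by
      intro hb
      rw [List.countP_eq_zero]
      intro a ha
      rcases List.mem_cons.mp ha with rfl | ha
      · simp; omega
      · have := hcle a ha; simp; omega
    have hwrest : (¬ -cur = w) → -w ∈ rest := by
      intro hb
      rcases List.mem_cons.mp hw with h | h
      · omega
      · exact h
    by_cases hc : cur = rankSum <;> by_cases hb : -cur = w
    · subst hc
      simp only [rankLoop, if_true, if_pos hb]
      have hcnt : cnt = 0 := hrs (by omega)
      simp [hzero hb, hcnt]
    · subst hc
      simp only [rankLoop, if_true, if_neg hb]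
      have hr := hwrest hb
      have hlt : cur < -w := by have := hcle _ hr; omega
      rw [ih rank (cnt + 1) cur hp' hr (by intro h; omega)]
      rw [List.countP_cons]
      simp only [hlt, decide_true, if_true]
      push_cast; ring
    · simp only [rankLoop, if_neg hc, if_pos hb]
      simp [hzero hb]
    · simp only [rankLoop, if_neg hc, if_neg hb]
      have hr := hwrest hb
      have hlt : cur < -w := by have := hcle _ hr; omega
      rw [ih (rank + cnt) 1 cur hp' hr (by intro h; omega)]
      rw [List.countP_cons]
      simp only [hlt, decide_true, if_true]
      push_cast; ring

-- B's fold counts eligible rows with a strictly larger sum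
theorem bfold_inv (sc : List (List Int)) (w : Int) :
    ∀ (R2 P2 : List (List Int)) (best : Option Int) (higher : Int),
    PySem.List.sorted sc (fun r => toLex (-(pyAt r 0), pyAt r 1)) false = P2 ++ R2 →
    ((best = none ∧ P2 = []) ∨
      (∃ b, best = some b ∧ (∀ q ∈ P2, pyAt q 1 ≤ b) ∧ (∃ q ∈ P2, pyAt q 1 = b))) →
    higher = (P2.countP (fun r => eligB sc r && decide (w < r.sum)) : Int) →
    (R2.foldl (fun (st : Option Int × Int) row =>
      let hit := (match st.1 with
        | none => true
        | some b => decide (b ≤ pyAt row 1)) && decide (w < row.sum)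
      let higher := if hit then st.2 + 1 else st.2
      let best := match st.1 with
        | none => some (pyAt row 1)
        | some b => some (max b (pyAt row 1))
      (best, higher)) (best, higher)).2 =
      ((P2 ++ R2).countP (fun r => eligB sc r && decide (w < r.sum)) : Int) := by
  intro R2
  induction R2 with
  | nil =>
    intro P2 best higher hsplit hbest hh
    simpa using hh
  | cons row R2' ih =>
    intro P2 best higher hsplit hbest hh
    have hsort := PySem.List.sorted_pairwise sc (fun r => toLex (-(pyAt r 0), pyAt r 1))
    rw [hsplit] at hsort
    obtain ⟨hPp, hCRp, hPR⟩ := List.pairwise_append.mp hsort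
    have hrowR' : ∀ q ∈ R2',
        toLex (-(pyAt row 0), pyAt row 1) ≤ toLex (-(pyAt q 0), pyAt q 1) :=
      (List.pairwise_cons.mp hCRp).1
    have hProw : ∀ q ∈ P2,
        toLex (-(pyAt q 0), pyAt q 1) ≤ toLex (-(pyAt row 0), pyAt row 1) :=
      fun q hq => hPR q hq row List.mem_cons_self
    have hmemq : ∀ q : List Int, q ∈ sc ↔ q ∈ P2 ++ row :: R2' := by
      intro q
      rw [← hsplit, PySem.List.mem_sorted]
    have hattR : ∀ q ∈ R2', pyAt q 0 ≤ pyAt row 0 := by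
      intro q hq
      have h := hrowR' q hq
      rw [Prod.Lex.le_iff] at h
      simp at h
      omega
    have hlexP : ∀ q ∈ P2, pyAt row 0 < pyAt q 0 ∨
        (pyAt q 0 = pyAt row 0 ∧ pyAt q 1 ≤ pyAt row 1) := by
      intro q hq
      have h := hProw q hq
      rw [Prod.Lex.le_iff] at h
      simp at h
      omega
    have hsplit' :
        PySem.List.sorted sc (fun r => toLex (-(pyAt r 0), pyAt r 1)) false =
          (P2 ++ [row]) ++ R2' := by
      rw [hsplit]; simp
    have hlist : ((P2 ++ [row]) ++ R2' : List (List Int)) = P2 ++ row :: R2' := by simp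
    rcases hbest with ⟨rfl, rfl⟩ | ⟨b, rfl, hmax, q0, hq0, hq0eq⟩
    · -- best is none, nothing processed yet
      have helig : eligB sc row = true := by
        rw [eligB_true_iff]
        intro q hq hlt
        have hqm : q ∈ row :: R2' := by simpa using (hmemq q).mp hq
        rcases List.mem_cons.mp hqm with rfl | hq'
        · omega
        · have := hattR q hq'
          omega
      have h := ih [row] (some (pyAt row 1))
        (if true && decide (w < row.sum) then higher + 1 else higher)
        (by simpa using hsplit')
        (Or.inr ⟨pyAt row 1, rfl, by simp, ⟨row, by simp, rfl⟩⟩)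
        (by
          rw [hh]
          by_cases hx : w < row.sum <;>
            simp [helig, hx])
      simpa using h
    · -- best = some b
      by_cases hb : b ≤ pyAt row 1
      · -- row is eligible
        have helig : eligB sc row = true := by
          rw [eligB_true_iff]
          intro q hq hlt
          have hqm := (hmemq q).mp hq
          rcases List.mem_append.mp hqm with hqP | hqCR
          · exact le_trans (hmax q hqP) hb
          · rcases List.mem_cons.mp hqCR with rfl | hq'
            · omega
            · have := hattR q hq'
              omega
        have h := ih (P2 ++ [row]) (some (max b (pyAt row 1)))
          (if decide (b ≤ pyAt row 1) && decide (w < row.sum) then higher + 1 else higher)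
          hsplit'
          (Or.inr ⟨max b (pyAt row 1), rfl,
            by
              intro q hq
              rcases List.mem_append.mp hq with h | h
              · exact le_trans (hmax q h) (le_max_left _ _)
              · have hqc : q = row := by simpa using h
                rw [hqc]
                exact le_max_right _ _,
            ⟨row, by simp, (max_eq_right hb).symm⟩⟩)
          (by
            rw [List.countP_append, hh]
            by_cases hx : w < row.sum <;>
              simp [helig, hb, hx])
        rw [hlist] at h
        exact h
      · -- row is dominated by the earlier best peer score
        have heligF : eligB sc row = false := by
          rw [eligB_false_iff]
        
          refine ⟨q0, (hmemq q0).mpr (List.mem_append_left _ hq0), ?_, ?_⟩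
          · rcases hlexP q0 hq0 with h | ⟨heq, hle⟩
            · exact h
            · omega
          · omega
        have h := ih (P2 ++ [row]) (some (max b (pyAt row 1)))
          (if decide (b ≤ pyAt row 1) && decide (w < row.sum) then higher + 1 else higher)
          hsplit'
          (Or.inr ⟨max b (pyAt row 1), rfl,
            by
              intro q hq
              rcases List.mem_append.mp hq with h | h
              · exact le_trans (hmax q h) (le_max_left _ _)
              · have hqc : q = row := by simpa using h
                rw [hqc]
                exact le_max_right _ _,
            ⟨q0, List.mem_append_left _ hq0,
              by rw [hq0eq, max_eq_left (by omega)]⟩⟩)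
          (by
            rw [List.countP_append, hh]
            simp [heligF, hb])
        rw [hlist] at h
        exact h

-- ===== VERDICT (by name: the statement is the Claim_ definition above) =====
theorem solution_spec : Claim_equal_solution := by
  unfold Claim_equal_solution
  intro sc _hdom hpre
  obtain ⟨hne0, hlen⟩ := hpre
  unfold Spec_solution
  match sc, hne0, hlen with
  | w0 :: sc', _, hlen =>
    have hW : PySem.List.pyGetD (w0 :: sc') (0 : Int) [] = w0 := by
      rw [(by norm_num : (0:Int) = ((0:Nat):Int)), PySem.List.pyGetD_natCast]
      rfl
    have hSperm := PySem.List.sorted_perm (w0 :: sc') (fun x => x) true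
    have hmemS : ∀ r : List Int,
        r ∈ PySem.List.sorted (w0 :: sc') (fun x => x) true ↔ r ∈ (w0 :: sc') :=
      fun r => hSperm.mem_iff
    have hSsort : (PySem.List.sorted (w0 :: sc') (fun x => x) true).Pairwise
        (fun a b => b ≤ a) := by
      rw [sortedA_irrel]
      exact PySem.List.sorted_pairwise_rev (w0 :: sc') (fun x => x)
    have hSne : PySem.List.sorted (w0 :: sc') (fun x => x) true ≠ [] := by
      intro h
      have hl := hSperm.length_eq
      rw [h] at hl
      simp at hl
    obtain ⟨f, T, hS⟩ : ∃ f T,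
        PySem.List.sorted (w0 :: sc') (fun x => x) true = f :: T := by
      cases hSx : PySem.List.sorted (w0 :: sc') (fun x => x) true with
      | nil => exact absurd hSx hSne
      | cons f T => exact ⟨f, T, rfl⟩
    have hfirst : PySem.List.pyGetD
        (PySem.List.sorted (w0 :: sc') (fun x => x) true) (0:Int) [] = f := by
      rw [hS, (by norm_num : (0:Int) = ((0:Nat):Int)), PySem.List.pyGetD_natCast]
      rfl
    have hstart := solGo_start (PySem.List.sorted (w0 :: sc') (fun x => x) true)
      w0 f hSne (by rw [hS]; rfl)
    have hinv := solGoL_inv (w0 :: sc') w0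
      (PySem.List.sorted (w0 :: sc') (fun x => x) true) hmemS hSsort hlen
      (PySem.List.sorted (w0 :: sc') (fun x => x) true) [] f f f []
      (by simp) (Or.inl ⟨rfl, by rw [hS]; rfl, rfl, rfl, rfl⟩)
    have hw0S : w0 ∈ PySem.List.sorted (w0 :: sc') (fun x => x) true :=
      (hmemS w0).mpr List.mem_cons_self
    have hs2perm := PySem.List.sorted_perm (w0 :: sc')
      (fun r => toLex (-(pyAt r 0), pyAt r 1)) false
    by_cases he : eligB (w0 :: sc') w0 = true
    · -- 완호 gets the incentive: both sides count larger sums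
      have hno : ∀ r ∈ PySem.List.sorted (w0 :: sc') (fun x => x) true,
          eligB (w0 :: sc') r = false → r ≠ w0 := by
        intro r _ hre hrw
        rw [hrw, he] at hre
        cases hre
      have hres := hinv.1 hno
      simp only [List.nil_append] at hres
      have hVp : (PySem.List.sorted
          (((PySem.List.sorted (w0 :: sc') (fun x => x) true).filter
            (eligB (w0 :: sc'))).map (fun r => -r.sum)) (fun x => x) false).Pairwise
          (· ≤ ·) := PySem.List.sorted_pairwise _ (fun x => x)
      have hmemV : (-(w0.sum)) ∈ PySem.List.sorted
          (((PySem.List.sorted (w0 :: sc') (fun x => x) true).filter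
            (eligB (w0 :: sc'))).map (fun r => -r.sum)) (fun x => x) false := by
        rw [PySem.List.mem_sorted]
        exact List.mem_map.mpr ⟨w0, List.mem_filter.mpr ⟨hw0S, he⟩, rfl⟩
      have hrank := rankLoop_eq (w0.sum) _ 1 0 (-1) hVp hmemV (fun _ => rfl)
      have hA : solution (w0 :: sc') =
          1 + 0 + (((PySem.List.sorted
            (((PySem.List.sorted (w0 :: sc') (fun x => x) true).filter
              (eligB (w0 :: sc'))).map (fun r => -r.sum)) (fun x => x) false).countP
            (fun v => decide (v < -(w0.sum)))) : Int) := by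
        simp only [solution]
        rw [hW, hfirst, hstart, hres]
        rw [if_neg (by norm_num)]
        exact hrank
      -- turn A's count into a count over the input list
      have hcA : ((PySem.List.sorted
            (((PySem.List.sorted (w0 :: sc') (fun x => x) true).filter
              (eligB (w0 :: sc'))).map (fun r => -r.sum)) (fun x => x) false).countP
            (fun v => decide (v < -(w0.sum))))
          = (w0 :: sc').countP (fun r => eligB (w0 :: sc') r && decide (w0.sum < r.sum)) := by
        rw [List.Perm.countP_eq _ (PySem.List.sorted_perm _ _ _)]
        rw [List.countP_map, List.countP_filter]
        rw [List.Perm.countP_eq _ hSperm]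
        apply List.countP_congr
        intro a _
        simp only [Function.comp_apply, Bool.and_eq_true, decide_eq_true_eq]
        constructor
        · rintro ⟨h1, h2⟩
          exact ⟨h2, by omega⟩
        · rintro ⟨h1, h2⟩
          exact ⟨by omega, h1⟩
      -- B's side
      have hguard : (w0 :: sc').any
          (fun r => decide (pyAt w0 0 < pyAt r 0) && decide (pyAt w0 1 < pyAt r 1)) = false := by
        have h := he
        rw [eligB] at h
        simpa using h
      have hfold := bfold_inv (w0 :: sc') (w0.sum)
        (PySem.List.sorted (w0 :: sc') (fun r => toLex (-(pyAt r 0), pyAt r 1)) false)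
        [] none 0 rfl (Or.inl ⟨rfl, rfl⟩) (by simp)
      simp only [List.nil_append] at hfold
      have hB : solution_alt (w0 :: sc') =
          ((w0 :: sc').countP (fun r => eligB (w0 :: sc') r && decide (w0.sum < r.sum)) : Int) + 1 := by
        simp only [solution_alt]
        rw [hW, hguard]
        simp only [Bool.false_eq_true, if_false]
        rw [hfold]
        rw [List.Perm.countP_eq _ hs2perm]
      rw [hA, hB, hcA]
      omega
    · -- 완호 is dominated: both sides return -1
      have he' : eligB (w0 :: sc') w0 = false := by
        cases h : eligB (w0 :: sc') w0
        · rfl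
        · exact absurd h he
      have hres := hinv.2 ⟨w0, hw0S, he', rfl⟩
      have hA : solution (w0 :: sc') = -1 := by
        simp only [solution]
        rw [hW, hfirst, hstart, hres]
        norm_num
      have hguard : (w0 :: sc').any
          (fun r => decide (pyAt w0 0 < pyAt r 0) && decide (pyAt w0 1 < pyAt r 1)) = true := by
        have h := he'
        rw [eligB] at h
        simpa using h
      have hB : solution_alt (w0 :: sc') = -1 := by
        simp only [solution_alt]
        rw [hW, hguard]
        simp
      rw [hA, hB]
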